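-- pv_equiv track=rewrite | github.com/yudai-patronai/problembook | problems/strings/str_period/solution.py | solve
-- ===== SOURCE A (Python) =====
-- def compute_z_function(s):
--     z = [-1]
--     left = right = 0
--     for i in range(1, len(s)):
--         x = min(z[i - left], right - i + 1) if i <= right else 0
--         while i + x < len(s) and s[x] == s[i + x]:
--             x += 1
--         if i + x - 1 > right:
--             left, right = i, i + x - 1
--         z.append(x)
--     return z
--
-- def solve(s):
--     n = len(s)
--     z = compute_z_function(s)
--     i = 0
--     for i in range(len(z)):
--         if i + z[i] == n and i and not n % i:
--             break
--
--     return n // (n - z[i]) if i else 1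
-- ===== SOURCE B (Python) =====
-- def solve(s):
--     n = len(s)
--     for i in range(1, n):
--         if n % i == 0 and s[i:] == s[:n - i]:
--             return n // i
--     return 1
-- ===== Notes on version B (the rewrite author's own statement) =====
-- stated objective: simpler
-- what changed: Replaces the Z-function computation and break-scan with a direct scan over candidate periods 1..n-1 that tests divisibility and compares the two slices s[i:] == s[:n-i], returning n//i for the first hit and 1 otherwise.
import Mathlib
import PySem

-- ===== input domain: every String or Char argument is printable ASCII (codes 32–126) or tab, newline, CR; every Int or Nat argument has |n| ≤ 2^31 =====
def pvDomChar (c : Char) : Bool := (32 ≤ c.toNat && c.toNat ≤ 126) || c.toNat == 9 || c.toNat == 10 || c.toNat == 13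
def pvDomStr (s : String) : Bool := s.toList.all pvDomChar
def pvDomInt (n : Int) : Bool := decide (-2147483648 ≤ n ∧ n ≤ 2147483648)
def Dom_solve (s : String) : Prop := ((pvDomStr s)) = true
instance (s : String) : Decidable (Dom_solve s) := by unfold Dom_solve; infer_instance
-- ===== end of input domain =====

-- B replaces the Z-function by a direct scan over candidate periods with slice comparison (simpler).

-- ===== PORT A =====
-- the inner `while i + x < len(s) and s[x] == s[i + x]: x += 1` of compute_z_function;
-- indices reached from solve are always nonnegative and in range, where pyGet? is exact
def zWhile (s : List Char) (i x : Int) : Int :=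
  if h : i + x < (s.length : Int) ∧ PySem.List.pyGet? s x = PySem.List.pyGet? s (i + x) then
    zWhile s i (x + 1)
  else x
termination_by ((s.length : Int) - (i + x)).toNat
decreasing_by omega

-- one iteration of the `for i in range(1, len(s))` loop; state = (z, left, right);
-- z[i - left] via pyGetD (the default is never read: 0 ≤ i - left < len z on reachable states)
def zStep (s : List Char) (st : List Int × Int × Int) (i : Int) : List Int × Int × Int :=
  let z := st.1
  let left := st.2.1
  let right := st.2.2
  let x0 : Int := if i ≤ right then min (PySem.List.pyGetD z (i - left) 0) (right - i + 1) else 0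
  let x := zWhile s i x0
  let p : Int × Int := if i + x - 1 > right then (i, i + x - 1) else (left, right)
  (z ++ [x], p.1, p.2)

def computeZ (s : List Char) : List Int :=
  ((PySem.List.pyRange 1 (s.length : Int) 1).foldl (zStep s) ([-1], 0, 0)).1

-- `i = 0; for i in range(len(z)): if i + z[i] == n and i and not n % i: break` — returns the
-- final value of the loop variable i (the break index, or the last index if no break)
def breakIdx (z : List Int) (n : Int) (i : Nat) : Nat :=
  if i < z.length then
    if (i : Int) + PySem.List.pyGetD z (i : Int) 0 = n ∧ i ≠ 0 ∧ PySem.Int.mod n (i : Int) = 0 then i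
    else if i + 1 < z.length then breakIdx z n (i + 1) else i
  else i
termination_by z.length - i

def solve (s : String) : Int :=
  let t := s.toList
  let n : Int := (t.length : Int)
  let z := computeZ t
  let i := breakIdx z n 0
  if i ≠ 0 then PySem.Int.floordiv n (n - PySem.List.pyGetD z (i : Int) 0) else 1

-- ===== PORT B =====
-- `for i in range(1, n): if n % i == 0 and s[i:] == s[:n-i]: return n // i` / `return 1`
def altGo (t : List Char) (n i : Nat) : Int :=
  if i < n then
    if n % i = 0 ∧ t.drop i = t.take (n - i) then ((n / i : Nat) : Int)
    else altGo t n (i + 1)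
  else 1
termination_by n - i

def solve_alt (s : String) : Int :=
  let t := s.toList
  altGo t t.length 1

-- ===== PRECONDITION & SPEC =====
def Spec_solve (s : String) (out : Int) : Prop := out = solve_alt s
instance (s : String) (out : Int) : Decidable (Spec_solve s out) := by unfold Spec_solve; infer_instance

-- ===== CLAIM (what is proved, stated in full; the proofs are below) =====
def Claim_equal_solve : Prop := ∀ (s : String), Dom_solve s → Spec_solve s (solve s)

-- ===== LEMMAS AND PROOFS =====

-- longest common prefix length of two character lists
def lcp : List Char → List Char → Nat
  | a :: as, b :: bs => if a = b then lcp as bs + 1 else 0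
  | _, _ => 0

theorem lcp_le_right : ∀ (a b : List Char), lcp a b ≤ b.length := by
  intro a
  induction a with
  | nil => intro b; cases b <;> simp [lcp]
  | cons x xs ih =>
    intro b
    cases b with
    | nil => simp [lcp]
    | cons y ys =>
      simp only [lcp]
      split_ifs
      · simpa using ih ys
      · simp

theorem lcp_getElem? : ∀ (a b : List Char) (j : Nat), j < lcp a b → a[j]? = b[j]? := by
  intro a
  induction a with
  | nil => intro b j h; cases b <;> simp [lcp] at h
  | cons x xs ih =>
    intro b j h
    cases b with
    | nil => simp [lcp] at h
    | cons y ys =>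
      simp only [lcp] at h
      split_ifs at h with hxy
      · cases j with
        | zero => simp [hxy]
        | succ k => simpa using ih ys k (by omega)
      · omega

theorem lcp_stop : ∀ (a b : List Char), lcp a b < a.length → lcp a b < b.length →
    a[lcp a b]? ≠ b[lcp a b]? := by
  intro a
  induction a with
  | nil => intro b h _; simp at h
  | cons x xs ih =>
    intro b h1 h2
    cases b with
    | nil => simp at h2
    | cons y ys =>
      by_cases hxy : x = y
      · rw [show lcp (x :: xs) (y :: ys) = lcp xs ys + 1 from by simp [lcp, hxy]] at h1 h2 ⊢
        simpa using ih ys (by simpa using h1) (by simpa using h2)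
      · rw [show lcp (x :: xs) (y :: ys) = 0 from by simp [lcp, hxy]]
        simpa using hxy

theorem le_lcp_of_matches : ∀ (a b : List Char) (x : Nat), x ≤ a.length → x ≤ b.length →
    (∀ j, j < x → a[j]? = b[j]?) → x ≤ lcp a b := by
  intro a
  induction a with
  | nil =>
    intro b x h _ _
    have h0 : lcp [] b = 0 := by cases b <;> rfl
    simp at h
    omega
  | cons c cs ih =>
    intro b x h1 h2 hm
    cases b with
    | nil =>
      have h0 : lcp (c :: cs) [] = 0 := rfl
      simp at h2
      omega
    | cons d ds =>
      cases x with
      | zero => omega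
      | succ k =>
        have h0 := hm 0 (by omega)
        simp at h0
        simp only [lcp, h0, if_true]
        have := ih ds k (by simpa using h1) (by simpa using h2)
          (fun j hj => by simpa using hm (j + 1) (by omega))
        omega

theorem lcp_eq_length_iff : ∀ (a b : List Char), b.length ≤ a.length →
    (lcp a b = b.length ↔ b = a.take b.length) := by
  intro a
  induction a with
  | nil =>
    intro b h
    have : b = [] := by cases b <;> simp_all
    subst this; simp [lcp]
  | cons x xs ih =>
    intro b h
    cases b with
    | nil => simp [lcp]
    | cons y ys =>
      simp only [lcp, List.length_cons, List.take_succ_cons, List.cons.injEq]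
      split_ifs with hxy
      · subst hxy
        have := ih ys (by simpa using h)
        constructor
        · intro he; exact ⟨rfl, (this.mp (by omega))⟩
        · intro he; rw [this.mpr he.2]
      · constructor
        · intro he; exfalso; have := lcp_le_right xs ys; omega
        · intro he; exact absurd he.1.symm hxy

-- the model of compute_z_function's output: -1, then lcp(s, s[j:]) for j = 1..m
def zlist (s : List Char) (m : Nat) : List Int :=
  -1 :: ((List.range m).map fun k => ((lcp s (s.drop (k + 1)) : Nat) : Int))

theorem zlist_length (s : List Char) (m : Nat) : (zlist s m).length = m + 1 := by
  simp [zlist]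

theorem zlist_get (s : List Char) (m j : Nat) (h1 : 1 ≤ j) (h2 : j ≤ m) :
    PySem.List.pyGetD (zlist s m) ((j : Nat) : Int) 0 = ((lcp s (s.drop j) : Nat) : Int) := by
  rw [PySem.List.pyGetD_natCast]
  obtain ⟨k, rfl⟩ : ∃ k, j = k + 1 := ⟨j - 1, by omega⟩
  simp only [zlist, List.getD, List.getElem?_cons_succ]
  rw [List.getElem?_map, List.getElem?_range (by omega)]
  simp

theorem zWhile_eq_lcp (s : List Char) (i x : Int) (hi : 1 ≤ i) (hin : i < (s.length : Int))
    (hx0 : 0 ≤ x) (hxle : x ≤ (s.length : Int) - i)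
    (hm : ∀ j : Nat, (j : Int) < x → s[j]? = s[i.toNat + j]?) :
    zWhile s i x = ((lcp s (s.drop i.toNat) : Nat) : Int) := by
  have hdl : (s.drop i.toNat).length = s.length - i.toNat := by simp
  have hxL : x.toNat ≤ lcp s (s.drop i.toNat) := by
    apply le_lcp_of_matches
    · omega
    · omega
    · intro j hj
      rw [List.getElem?_drop]
      exact hm j (by omega)
  set L : Nat := lcp s (s.drop i.toNat) with hL
  have hLle : L ≤ s.length - i.toNat := hdl ▸ lcp_le_right s (s.drop i.toNat)
  -- induction on L - x
  have key : ∀ (k : Nat) (x : Int), 0 ≤ x → x.toNat ≤ L → ((L : Int) - x).toNat ≤ k →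
      (∀ j : Nat, (j : Int) < x → s[j]? = s[i.toNat + j]?) →
      zWhile s i x = (L : Int) := by
    intro k
    induction k with
    | zero =>
      intro x hx0 hxL hk hm
      have hxeq : x = (L : Int) := by omega
      subst hxeq
      rw [zWhile]
      rw [dif_neg]
      rintro ⟨h1, h2⟩
      have hLlt : L < s.length - i.toNat := by omega
      have hstop := lcp_stop s (s.drop i.toNat) (by omega) (by omega)
      rw [List.getElem?_drop] at hstop
      apply hstop
      rw [PySem.List.pyGet?_of_nonneg _ (show (0:Int) ≤ (L : Int) by omega),
        PySem.List.pyGet?_of_nonneg _ (show (0:Int) ≤ i + (L : Int) by omega)] at h2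
      have e1 : ((L : Int)).toNat = L := by omega
      have e2 : (i + (L : Int)).toNat = i.toNat + L := by omega
      rw [e1, e2] at h2
      rw [hL] at h2
      exact h2
    | succ k ih =>
      intro x hx0 hxL hk hm
      by_cases hlt : x.toNat < L
      · rw [zWhile]
        have hxn : x.toNat < s.length := by omega
        have hixn : i.toNat + x.toNat < s.length := by omega
        have hchar : s[x.toNat]? = s[i.toNat + x.toNat]? := by
          have := lcp_getElem? s (s.drop i.toNat) x.toNat (by omega)
          rw [List.getElem?_drop] at this
          exact this
        rw [dif_pos]
        · apply ih (x + 1) (by omega) (by omega) (by omega)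
          intro j hj
          by_cases hje : (j : Int) < x
          · exact hm j hje
          · have : j = x.toNat := by omega
            subst this
            exact hchar
        · constructor
          · omega
          · rw [PySem.List.pyGet?_of_nonneg _ (show (0:Int) ≤ x by omega),
              PySem.List.pyGet?_of_nonneg _ (show (0:Int) ≤ i + x by omega)]
            rw [show (i + x).toNat = i.toNat + x.toNat by omega]
            exact hchar
      · have hxeq : x = (L : Int) := by omega
        subst hxeq
        rw [zWhile]
        rw [dif_neg]
        rintro ⟨h1, h2⟩
        have hstop := lcp_stop s (s.drop i.toNat) (by omega) (by omega)
        rw [List.getElem?_drop] at hstop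
        apply hstop
        rw [PySem.List.pyGet?_of_nonneg _ (show (0:Int) ≤ (L : Int) by omega),
          PySem.List.pyGet?_of_nonneg _ (show (0:Int) ≤ i + (L : Int) by omega)] at h2
        have e1 : ((L : Int)).toNat = L := by omega
        have e2 : (i + (L : Int)).toNat = i.toNat + L := by omega
        rw [e1, e2] at h2
        rw [hL] at h2
        exact h2
  exact key ((L : Int) - x).toNat x hx0 hxL (le_refl _) hm

-- window invariant of the z-algorithm after processing i = 1..m
def WindowOK (s : List Char) (m : Nat) (left right : Int) : Prop :=
  (left = 0 ∧ right = 0) ∨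
  (∃ l : Nat, left = (l : Int) ∧ 1 ≤ l ∧ l ≤ m ∧
    right = (l : Int) + ((lcp s (s.drop l) : Nat) : Int) - 1)

def ZInv (s : List Char) (m : Nat) (st : List Int × Int × Int) : Prop :=
  st.1 = zlist s m ∧ WindowOK s m st.2.1 st.2.2

theorem zStep_correct (s : List Char) (m : Nat) (st : List Int × Int × Int)
    (hst : ZInv s m st) (hmn : m + 1 < s.length) :
    ZInv s (m + 1) (zStep s st (((m + 1 : Nat) : Int))) := by
  obtain ⟨hz, hw⟩ := hst
  set i : Nat := m + 1 with hidef
  set L : Nat := lcp s (s.drop i) with hLdef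
  have hLle : L ≤ s.length - i := by
    have := lcp_le_right s (s.drop i)
    simpa using this
  -- the computed x equals L
  have hx : zWhile s ((i : Nat) : Int)
      (if ((i : Nat) : Int) ≤ st.2.2 then
        min (PySem.List.pyGetD st.1 (((i : Nat) : Int) - st.2.1) 0) (st.2.2 - ((i : Nat) : Int) + 1)
      else 0) = ((L : Nat) : Int) := by
    split_ifs with hir
    · -- inside the window
      rcases hw with ⟨hl0, hr0⟩ | ⟨l, hleq, hl1, hlm, hreq⟩
      · exfalso; rw [hr0] at hir; omega
      have hLl := lcp_le_right s (s.drop l)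
      have hdll : (s.drop l).length = s.length - l := by simp
      rw [hdll] at hLl
      set Ll : Nat := lcp s (s.drop l) with hLldef
      have hli : l < i := by
        rw [hreq] at hir
        by_contra hc
        push_neg at hc
        have : i ≤ l := by omega
        have : Ll ≤ s.length - l := hLl
        omega
      set d : Nat := i - l with hddef
      have hd1 : 1 ≤ d := by omega
      have hdm : d ≤ m := by omega
      have hidx : ((i : Nat) : Int) - st.2.1 = ((d : Nat) : Int) := by
        rw [hleq]; push_cast; omega
      rw [hidx, hz, zlist_get s m d hd1 hdm]
      set Ld : Nat := lcp s (s.drop d) with hLddef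
      have hR : st.2.2 - ((i : Nat) : Int) + 1 = ((l + Ll : Nat) : Int) - ((i : Nat) : Int) := by
        rw [hreq]; push_cast; omega
      -- d + (window remainder) = Ll
      have hir' : (i : Int) ≤ (l : Int) + (Ll : Int) - 1 := by rw [hreq] at hir; push_cast at hir ⊢; omega
      apply zWhile_eq_lcp
      · push_cast; omega
      · push_cast; omega
      · rw [hR]; push_cast; omega
      · rw [hR]; push_cast; omega
      · intro j hj
        rw [hR] at hj
        have hjLd : j < Ld := by omega
        have hjR : (j : Int) < ((l + Ll : Nat) : Int) - ((i : Nat) : Int) := by omega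
        have hdj : d + j < Ll := by push_cast at hjR; omega
        have e1 : s[j]? = s[d + j]? := by
          have := lcp_getElem? s (s.drop d) j hjLd
          rw [List.getElem?_drop] at this
          exact this
        have e2 : s[d + j]? = s[l + (d + j)]? := by
          have := lcp_getElem? s (s.drop l) (d + j) hdj
          rw [List.getElem?_drop] at this
          exact this
        have e3 : l + (d + j) = i + j := by omega
        have e4 : (((i : Nat) : Int)).toNat = i := by omega
        rw [e4, e1, e2, e3]
    · -- x0 = 0
      apply zWhile_eq_lcp
      · push_cast; omega
      · push_cast; omega
      · omega
      · push_cast; omega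
      · intro j hj; omega
  -- now unfold zStep
  constructor
  · show (zStep s st ((i : Nat) : Int)).1 = zlist s (m + 1)
    simp only [zStep]
    rw [hx, hz]
    simp only [zlist, List.range_succ, List.map_append, List.map_cons, List.map_nil]
    rw [List.cons_append]
  · show WindowOK s (m + 1) (zStep s st ((i : Nat) : Int)).2.1 (zStep s st ((i : Nat) : Int)).2.2
    simp only [zStep]
    rw [hx]
    split_ifs with hupd
    · right
      exact ⟨i, rfl, by omega, by omega, rfl⟩
    · rcases hw with ⟨hl0, hr0⟩ | ⟨l, hleq, hl1, hlm, hreq⟩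
      · left; exact ⟨hl0, hr0⟩
      · right; exact ⟨l, hleq, hl1, by omega, hreq⟩

theorem computeZ_eq (s : List Char) (h : 1 ≤ s.length) :
    computeZ s = zlist s (s.length - 1) := by
  have main : ∀ m : Nat, m ≤ s.length - 1 →
      ZInv s m ((PySem.List.pyRange 1 ((m : Int) + 1) 1).foldl (zStep s) ([-1], 0, 0)) := by
    intro m
    induction m with
    | zero =>
      intro _
      rw [PySem.List.pyRange_one_eq_nil (by omega)]
      exact ⟨by simp [zlist], Or.inl ⟨rfl, rfl⟩⟩
    | succ k ih =>
      intro hk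
      have e : ((k + 1 : Nat) : Int) + 1 = ((k : Int) + 1) + 1 := by push_cast; ring
      rw [e, PySem.List.pyRange_one_succ_right (by omega), List.foldl_append, List.foldl_cons,
        List.foldl_nil]
      have e2 : ((k : Int) + 1) = ((k + 1 : Nat) : Int) := by push_cast; ring
      rw [e2]
      exact zStep_correct s k _ (ih (by omega)) (by omega)
  have e3 : (s.length : Int) = ((s.length - 1 : Nat) : Int) + 1 := by push_cast [h]; omega
  unfold computeZ
  rw [e3]
  exact (main (s.length - 1) (le_refl _)).1

-- the break condition of A's scan, in model terms
def CondA (s : List Char) (j : Nat) : Prop :=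
  1 ≤ j ∧ j < s.length ∧ j + lcp s (s.drop j) = s.length ∧ s.length % j = 0

theorem cond_port_iff (s : List Char) (j : Nat) (hj : j < s.length) (h1 : 1 ≤ s.length) :
    ((( j : Nat) : Int) + PySem.List.pyGetD (zlist s (s.length - 1)) ((j : Nat) : Int) 0 = (s.length : Int) ∧
      j ≠ 0 ∧ PySem.Int.mod (s.length : Int) ((j : Nat) : Int) = 0) ↔ CondA s j := by
  constructor
  · rintro ⟨hsum, hj0, hmod⟩
    have hj1 : 1 ≤ j := by omega
    rw [zlist_get s (s.length - 1) j hj1 (by omega)] at hsum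
    refine ⟨hj1, hj, ?_, ?_⟩
    · push_cast at hsum; omega
    · rw [PySem.Int.mod_eq_zero_iff_dvd] at hmod
      have : j ∣ s.length := by exact_mod_cast hmod
      omega
  · rintro ⟨hj1, _, hsum, hmod⟩
    refine ⟨?_, by omega, ?_⟩
    · rw [zlist_get s (s.length - 1) j hj1 (by omega)]
      push_cast; omega
    · rw [PySem.Int.mod_eq_zero_iff_dvd]
      exact_mod_cast Nat.dvd_of_mod_eq_zero hmod

theorem breakIdx_found (s : List Char) (h1 : 1 ≤ s.length) (istar : Nat)
    (hc : CondA s istar) :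
    ∀ i0 : Nat, i0 ≤ istar → (∀ j, i0 ≤ j → j < istar → ¬ CondA s j) →
      breakIdx (zlist s (s.length - 1)) (s.length : Int) i0 = istar := by
  have hlen : (zlist s (s.length - 1)).length = s.length := by rw [zlist_length]; omega
  have hst1 := hc.1
  have hst2 := hc.2.1
  intro i0 hi0 hnone
  induction hbound : istar - i0 generalizing i0 with
  | zero =>
    have : i0 = istar := by omega
    subst this
    rw [breakIdx, if_pos (by rw [hlen]; omega), if_pos ((cond_port_iff s i0 hst2 h1).mpr hc)]
  | succ k ih =>
    have hi0lt : i0 < istar := by omega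
    rw [breakIdx, if_pos (by rw [hlen]; omega)]
    rw [if_neg (fun hcond => hnone i0 (le_refl _) hi0lt ((cond_port_iff s i0 (by omega) h1).mp hcond))]
    rw [if_pos (by rw [hlen]; omega)]
    exact ih (i0 + 1) (by omega) (fun j hj1 hj2 => hnone j (by omega) hj2) (by omega)

theorem breakIdx_none (s : List Char) (h1 : 1 ≤ s.length)
    (hnone : ∀ j, ¬ CondA s j) :
    ∀ i0 : Nat, i0 < s.length → breakIdx (zlist s (s.length - 1)) (s.length : Int) i0 = s.length - 1 := by
  have hlen : (zlist s (s.length - 1)).length = s.length := by rw [zlist_length]; omega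
  intro i0 hi0
  induction hbound : s.length - 1 - i0 generalizing i0 with
  | zero =>
    rw [breakIdx, if_pos (by rw [hlen]; omega)]
    rw [if_neg (fun hcond => hnone i0 ((cond_port_iff s i0 hi0 h1).mp hcond))]
    rw [if_neg (by rw [hlen]; omega)]
    omega
  | succ k ih =>
    rw [breakIdx, if_pos (by rw [hlen]; omega)]
    rw [if_neg (fun hcond => hnone i0 ((cond_port_iff s i0 hi0 h1).mp hcond))]
    rw [if_pos (by rw [hlen]; omega)]
    exact ih (i0 + 1) (by omega) (by omega)

-- B's condition equals A's condition on 1 ≤ i < n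
theorem condB_iff (t : List Char) (i : Nat) (h1 : 1 ≤ i) (h2 : i < t.length) :
    (t.length % i = 0 ∧ t.drop i = t.take (t.length - i)) ↔ CondA t i := by
  have hdl : (t.drop i).length = t.length - i := by simp
  have hle : (t.drop i).length ≤ t.length := by omega
  have hiff := lcp_eq_length_iff t (t.drop i) hle
  have hLle := lcp_le_right t (t.drop i)
  constructor
  · rintro ⟨hmod, hdt⟩
    refine ⟨h1, h2, ?_, hmod⟩
    have : lcp t (t.drop i) = (t.drop i).length := by
      rw [hiff, hdl]; exact hdt
    omega
  · rintro ⟨_, _, hsum, hmod⟩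
    refine ⟨hmod, ?_⟩
    have : lcp t (t.drop i) = (t.drop i).length := by omega
    have := hiff.mp this
    rw [hdl] at this
    exact this

theorem altGo_found (t : List Char) (istar : Nat)
    (hc1 : 1 ≤ istar) (hc2 : istar < t.length)
    (hc : t.length % istar = 0 ∧ t.drop istar = t.take (t.length - istar)) :
    ∀ i0 : Nat, i0 ≤ istar →
      (∀ j, i0 ≤ j → j < istar → ¬ (t.length % j = 0 ∧ t.drop j = t.take (t.length - j))) →
      altGo t t.length i0 = ((t.length / istar : Nat) : Int) := by
  intro i0 hi0 hnone
  induction hbound : istar - i0 generalizing i0 with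
  | zero =>
    have : i0 = istar := by omega
    subst this
    rw [altGo, if_pos hc2, if_pos hc]
  | succ k ih =>
    rw [altGo, if_pos (by omega), if_neg (hnone i0 (le_refl _) (by omega))]
    exact ih (i0 + 1) (by omega) (fun j hj1 hj2 => hnone j (by omega) hj2) (by omega)

theorem altGo_none (t : List Char)
    (hnone : ∀ j, 1 ≤ j → j < t.length → ¬ (t.length % j = 0 ∧ t.drop j = t.take (t.length - j))) :
    ∀ i0 : Nat, 1 ≤ i0 → altGo t t.length i0 = 1 := by
  intro i0 hi0
  induction hbound : t.length - i0 generalizing i0 with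
  | zero =>
    rw [altGo, if_neg (by omega)]
  | succ k ih =>
    rw [altGo, if_pos (by omega), if_neg (hnone i0 hi0 (by omega))]
    exact ih (i0 + 1) (by omega) (by omega)

-- ===== VERDICT (by name: the statement is the Claim_ definition above) =====
theorem solve_spec : Claim_equal_solve := by
  unfold Claim_equal_solve
  intro s _
  unfold Spec_solve solve solve_alt
  show (if breakIdx (computeZ s.toList) ((s.toList.length : Nat) : Int) 0 ≠ 0 then
      PySem.Int.floordiv ((s.toList.length : Nat) : Int)
        (((s.toList.length : Nat) : Int) -
          PySem.List.pyGetD (computeZ s.toList)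
            ((breakIdx (computeZ s.toList) ((s.toList.length : Nat) : Int) 0 : Nat) : Int) 0)
    else 1) = altGo s.toList s.toList.length 1
  set t : List Char := s.toList with ht
  by_cases hnil : t = []
  · -- empty string: both sides compute 1
    rw [hnil]
    have e1 : computeZ [] = [-1] := by
      unfold computeZ
      rw [PySem.List.pyRange_one_eq_nil (by simp)]
      rfl
    have e2 : breakIdx [-1] ((([] : List Char).length : Nat) : Int) 0 = 0 := by
      rw [breakIdx]
      norm_num
    rw [e1, e2]
    norm_num
    rw [altGo]
    norm_num
  · have h1 : 1 ≤ t.length := by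
      have := List.length_pos_of_ne_nil hnil
      omega
    rw [computeZ_eq t h1]
    by_cases hex : ∃ j, CondA t j
    · -- a period dividing n exists: both return n / i* for the least such i*
      obtain ⟨j0, hj0⟩ := hex
      haveI : DecidablePred (CondA t) := Classical.decPred _
      have hwf : ∃ j, CondA t j := ⟨j0, hj0⟩
      set istar := Nat.find hwf with histar
      have hcstar : CondA t istar := Nat.find_spec hwf
      have hmin : ∀ j, j < istar → ¬ CondA t j := fun j hj => Nat.find_min hwf hj
      rw [breakIdx_found t h1 istar hcstar 0 (by omega) (fun j _ hj => hmin j hj)]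
      have hi1 : istar ≠ 0 := by have := hcstar.1; omega
      rw [if_pos hi1]
      rw [zlist_get t (t.length - 1) istar hcstar.1 (by have := hcstar.2.1; omega)]
      have hL : lcp t (t.drop istar) = t.length - istar := by
        have := hcstar.2.2.1; have := hcstar.2.1; omega
      have hsub : (t.length : Int) - ((lcp t (t.drop istar) : Nat) : Int) = ((istar : Nat) : Int) := by
        rw [hL]; have := hcstar.2.1; push_cast; omega
      rw [hsub, PySem.Int.floordiv_natCast]
      rw [altGo_found t istar hcstar.1 hcstar.2.1
        ((condB_iff t istar hcstar.1 hcstar.2.1).mpr hcstar) 1 hcstar.1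
        (fun j hj1 hj2 hcb => hmin j hj2 ((condB_iff t j hj1 (by have := hcstar.2.1; omega)).mp hcb))]
    · -- no period dividing n: both return 1
      push_neg at hex
      rw [breakIdx_none t h1 hex 0 (by omega)]
      rw [altGo_none t (fun j hj1 hj2 hcb => hex j ((condB_iff t j hj1 hj2).mp hcb)) 1 (le_refl _)]
      by_cases hn1 : t.length = 1
      · rw [if_neg (by omega)]
      · -- n ≥ 2: the fall-through value n // (n - z[n-1]) is 1
        have hn2 : 2 ≤ t.length := by omega
        rw [if_pos (by omega)]
        rw [zlist_get t (t.length - 1) (t.length - 1) (by omega) (le_refl _)]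
        set L := lcp t (t.drop (t.length - 1)) with hLd
        have hLle : L ≤ 1 := by
          have := lcp_le_right t (t.drop (t.length - 1))
          simp at this
          omega
        have hLne : t.length - 1 + L ≠ t.length ∨ t.length % (t.length - 1) ≠ 0 := by
          by_contra hc
          push_neg at hc
          exact hex (t.length - 1) ⟨by omega, by omega, hc.1, hc.2⟩
        have hgoal : (t.length : Int) - ((L : Nat) : Int) = (t.length : Int) ∨
            (t.length : Int) - ((L : Nat) : Int) = (t.length : Int) - 1 := by
          interval_cases L <;> simp
        rcases hgoal with hg | hg
        · rw [hg]
          rw [show (t.length : Int) = ((t.length : Nat) : Int) from rfl, PySem.Int.floordiv_natCast]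
          rw [Nat.div_self (by omega)]
          norm_num
        · rw [hg]
          have e : (t.length : Int) - 1 = ((t.length - 1 : Nat) : Int) := by push_cast; omega
          rw [e, PySem.Int.floordiv_natCast]
          -- n / (n-1) = 1 except n = 2; when n = 2, L = 1 forces CondA 1, excluded
          by_cases hn2' : t.length = 2
          · exfalso
            have hL1 : L = 1 := by
              have : (t.length : Int) - ((L:Nat):Int) = (t.length : Int) - 1 := hg
              omega
            apply hex 1
            refine ⟨le_refl _, by omega, ?_, by omega⟩
            rw [hLd] at hL1
            rw [hn2'] at hL1 ⊢
            rw [show (2 : Nat) - 1 = 1 from rfl] at hL1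
            omega
          · have : t.length / (t.length - 1) = 1 := by
              apply Nat.div_eq_of_lt_le <;> omega
            rw [this]
            norm_num
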